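-- pv_equiv track=rewrite | github.com/AIDMI-DataHub/heat-news-extraction | src/query/_models.py | batch_districts
-- ===== SOURCE A (Python) =====
-- def _quote_if_multi_word(term: str) -> str:
--     """Wrap a term in double quotes if it contains spaces."""
--     if " " in term:
--         return f'"{term}"'
--     return term
--
-- def batch_districts(
--     districts: list[str], heat_term: str, max_chars: int
-- ) -> list[str]:
--     """Batch district names into query strings within a character limit.
--
--     Each batch produces a query string of the form:
--     ``heat_term ("District1" OR "District2" OR District3)``
--
--     Multi-word district names are double-quoted.
--
--     Args:
--         districts: List of district name strings.
--         heat_term: The heat term to prepend (e.g. "heatwave").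
--         max_chars: Maximum allowed length for each query string.
--
--     Returns:
--         List of query strings, each within *max_chars*.
--     """
--     if not districts:
--         return []
--
--     # Overhead: heat_term + " (" + district_part + ")"
--     overhead = len(heat_term) + 3  # " (" prefix + ")" suffix
--     budget = max_chars - overhead
--
--     queries: list[str] = []
--     batch: list[str] = []
--     used = 0
--
--     for d in districts:
--         name = _quote_if_multi_word(d)
--         cost = len(name) + (4 if batch else 0)  # " OR " separator
--         if used + cost > budget and batch:
--             # Flush current batch
--             query = f'{heat_term} ({" OR ".join(batch)})'
--             queries.append(query)
--             batch = [name]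
--             used = len(name)
--         else:
--             batch.append(name)
--             used += cost
--
--     if batch:
--         query = f'{heat_term} ({" OR ".join(batch)})'
--         queries.append(query)
--
--     return queries
-- ===== SOURCE B (Python) =====
-- def _quote_if_multi_word(term: str) -> str:
--     """Wrap a term in double quotes if it contains spaces."""
--     if " " in term:
--         return f'"{term}"'
--     return term
--
--
-- def batch_districts(districts, heat_term, max_chars):
--     """Batch district names into query strings within a character limit.
--
--     Staged decomposition instead of a single accumulator fold: quote all names
--     first, then greedily chunk the name list into maximal batches with an
--     index-based fit scan, then render each batch as a query string.
--     """
--     names = [_quote_if_multi_word(d) for d in districts]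
--     budget = max_chars - len(heat_term) - 3
--     batches = []
--     i = 0
--     while i < len(names):
--         used = len(names[i])
--         j = i + 1
--         while j < len(names) and used + 4 + len(names[j]) <= budget:
--             used += 4 + len(names[j])
--             j += 1
--         batches.append(names[i:j])
--         i = j
--     return [f'{heat_term} ({" OR ".join(b)})' for b in batches]
-- ===== Notes on version B (the rewrite author's own statement) =====
-- stated objective: alternative
-- what changed: Replaced A's single fold carrying a (queries, batch, used) accumulator with a staged pipeline: quote all names first, greedily chunk the name list into maximal batches via an index-based fit scan, then render each batch into a query string.
import Mathlib
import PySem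

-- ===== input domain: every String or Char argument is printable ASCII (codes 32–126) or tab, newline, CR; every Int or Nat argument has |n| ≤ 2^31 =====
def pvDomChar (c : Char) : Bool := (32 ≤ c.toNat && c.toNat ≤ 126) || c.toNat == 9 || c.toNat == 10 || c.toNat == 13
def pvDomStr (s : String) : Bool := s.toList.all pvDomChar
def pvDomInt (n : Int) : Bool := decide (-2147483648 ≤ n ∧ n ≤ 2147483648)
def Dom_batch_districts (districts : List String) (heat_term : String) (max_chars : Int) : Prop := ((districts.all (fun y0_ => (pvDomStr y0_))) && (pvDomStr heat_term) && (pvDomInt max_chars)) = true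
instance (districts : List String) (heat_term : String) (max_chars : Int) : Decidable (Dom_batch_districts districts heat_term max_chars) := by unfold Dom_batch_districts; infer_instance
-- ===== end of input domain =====

-- B replaces A's single fold with a (queries, batch, used) accumulator by a staged
-- pipeline: quote all names, greedily chunk them into maximal batches, then render
-- each batch as a query string (alternative decomposition, same results).

-- ===== PORT A =====
-- _quote_if_multi_word (same helper in both Pythons)
def quote_if_multi_word (term : String) : String :=
  if PySem.Str.isIn " " term then "\"" ++ term ++ "\"" else term

def batch_districts (districts : List String) (heat_term : String) (max_chars : Int) : List String :=
  if districts = [] then []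
  else
    let overhead := PySem.Str.len heat_term + 3
    let budget := max_chars - overhead
    let st := districts.foldl (fun (st : List String × List String × Int) d =>
      let name := quote_if_multi_word d
      let cost := PySem.Str.len name + (if st.2.1 ≠ [] then 4 else 0)
      if st.2.2 + cost > budget ∧ st.2.1 ≠ [] then
        (st.1 ++ [heat_term ++ " (" ++ PySem.Str.join " OR " st.2.1 ++ ")"], [name], PySem.Str.len name)
      else
        (st.1, st.2.1 ++ [name], st.2.2 + cost)) ([], [], 0)
    if st.2.1 ≠ [] then st.1 ++ [heat_term ++ " (" ++ PySem.Str.join " OR " st.2.1 ++ ")"] else st.1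

-- ===== PORT B =====
-- inner while loop of Source B: how many further names still fit in the batch
def pvFitCount (budget used : Int) : List String → Nat
  | [] => 0
  | n :: t =>
    if used + 4 + PySem.Str.len n ≤ budget then pvFitCount budget (used + 4 + PySem.Str.len n) t + 1
    else 0

-- outer while loop of Source B: split the name list into greedy batches
def pvChunk (budget : Int) (names : List String) : List (List String) :=
  match names with
  | [] => []
  | n :: t =>
    let k := pvFitCount budget (PySem.Str.len n) t
    (n :: t.take k) :: pvChunk budget (t.drop k)
termination_by names.length
decreasing_by simp [List.length_drop]

def batch_districts_alt (districts : List String) (heat_term : String) (max_chars : Int) : List String :=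
  let names := districts.map quote_if_multi_word
  let budget := max_chars - PySem.Str.len heat_term - 3
  (pvChunk budget names).map (fun b => heat_term ++ " (" ++ PySem.Str.join " OR " b ++ ")")

-- ===== PRECONDITION & SPEC =====
def Spec_batch_districts (districts : List String) (heat_term : String) (max_chars : Int) (out : List String) : Prop := out = batch_districts_alt districts heat_term max_chars
instance (districts : List String) (heat_term : String) (max_chars : Int) (out : List String) : Decidable (Spec_batch_districts districts heat_term max_chars out) := by unfold Spec_batch_districts; infer_instance

-- ===== CLAIM (what is proved, stated in full; the proofs are below) =====
def Claim_equal_batch_districts : Prop := ∀ (districts : List String) (heat_term : String) (max_chars : Int), Dom_batch_districts districts heat_term max_chars → Spec_batch_districts districts heat_term max_chars (batch_districts districts heat_term max_chars)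

-- ===== LEMMAS AND PROOFS =====

-- A's loop starting from a nonempty batch produces exactly B's greedy chunking
lemma loop_eq (heat_term : String) (max_chars : Int) (ds : List String)
    (q b : List String) (u : Int) (hb : b ≠ []) :
    (let st := ds.foldl (fun (st : List String × List String × Int) d =>
      let name := quote_if_multi_word d
      let cost := PySem.Str.len name + (if st.2.1 ≠ [] then 4 else 0)
      if st.2.2 + cost > max_chars - (PySem.Str.len heat_term + 3) ∧ st.2.1 ≠ [] then
        (st.1 ++ [heat_term ++ " (" ++ PySem.Str.join " OR " st.2.1 ++ ")"], [name], PySem.Str.len name)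
      else
        (st.1, st.2.1 ++ [name], st.2.2 + cost)) (q, b, u)
     if st.2.1 ≠ [] then st.1 ++ [heat_term ++ " (" ++ PySem.Str.join " OR " st.2.1 ++ ")"] else st.1) =
    q ++ (((b ++ (ds.map quote_if_multi_word).take (pvFitCount (max_chars - (PySem.Str.len heat_term + 3)) u (ds.map quote_if_multi_word))) ::
      pvChunk (max_chars - (PySem.Str.len heat_term + 3)) ((ds.map quote_if_multi_word).drop (pvFitCount (max_chars - (PySem.Str.len heat_term + 3)) u (ds.map quote_if_multi_word)))).map
      (fun bb => heat_term ++ " (" ++ PySem.Str.join " OR " bb ++ ")")) := by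
  induction ds generalizing q b u with
  | nil => simp [hb, pvFitCount, pvChunk]
  | cons d rest ih =>
    simp only [List.foldl_cons, List.map_cons]
    by_cases hfit : u + 4 + PySem.Str.len (quote_if_multi_word d) ≤ max_chars - (PySem.Str.len heat_term + 3)
    · have hcond : ¬ (u + (PySem.Str.len (quote_if_multi_word d) + (if b ≠ [] then 4 else 0)) > max_chars - (PySem.Str.len heat_term + 3) ∧ b ≠ []) := by
        simp only [if_pos hb]
        intro h; omega
      simp only [if_neg hcond]
      have harith : u + (PySem.Str.len (quote_if_multi_word d) + (if b ≠ [] then 4 else 0)) = u + 4 + PySem.Str.len (quote_if_multi_word d) := by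
        simp only [if_pos hb]; ring
      rw [harith]
      have := ih q (b ++ [quote_if_multi_word d]) (u + 4 + PySem.Str.len (quote_if_multi_word d)) (by simp)
      rw [this]
      simp only [pvFitCount, if_pos hfit, List.take_succ_cons, List.drop_succ_cons, List.append_assoc, List.cons_append, List.nil_append, List.map_cons]
    · have hcond : (u + (PySem.Str.len (quote_if_multi_word d) + (if b ≠ [] then 4 else 0)) > max_chars - (PySem.Str.len heat_term + 3) ∧ b ≠ []) := by
        simp only [if_pos hb]
        exact ⟨by omega, hb⟩
      simp only [if_pos hcond]
      have := ih (q ++ [heat_term ++ " (" ++ PySem.Str.join " OR " b ++ ")"]) [quote_if_multi_word d] (PySem.Str.len (quote_if_multi_word d)) (by simp)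
      rw [this]
      simp only [pvFitCount, if_neg hfit, List.take_zero, List.drop_zero, List.append_nil, pvChunk]
      simp [List.append_assoc]

-- ===== VERDICT (by name: the statement is the Claim_ definition above) =====
theorem batch_districts_spec : Claim_equal_batch_districts := by
  intro districts heat_term max_chars _
  unfold Spec_batch_districts batch_districts batch_districts_alt
  cases districts with
  | nil => simp [pvChunk]
  | cons d rest =>
    simp only [if_neg (List.cons_ne_nil d rest), List.foldl_cons, List.map_cons]
    have hstep : ¬ ((0 : Int) + (PySem.Str.len (quote_if_multi_word d) + (if ([] : List String) ≠ [] then 4 else 0)) > max_chars - (PySem.Str.len heat_term + 3) ∧ ([] : List String) ≠ []) := by simp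
    simp only [if_neg hstep, List.nil_append]
    have harith : (0 : Int) + (PySem.Str.len (quote_if_multi_word d) + (if ([] : List String) ≠ [] then 4 else 0)) = PySem.Str.len (quote_if_multi_word d) := by simp
    rw [harith]
    have hbud : max_chars - PySem.Str.len heat_term - 3 = max_chars - (PySem.Str.len heat_term + 3) := by ring
    rw [hbud]
    have := loop_eq heat_term max_chars rest [] [quote_if_multi_word d] (PySem.Str.len (quote_if_multi_word d)) (by simp)
    rw [this]
    simp only [pvChunk, List.nil_append, List.cons_append, List.map_cons]
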